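-- pv_equiv track=rewrite | github.com/kakao/pycon2016apac-gawibawibo | 0814/player_frigen.py | prng
-- ===== SOURCE A (Python) =====
-- def prng(n):
--     x = 111131111
--     a = 123456789
--     b = 1
--     p = 99999199999 # Yes, it's a prime
--     for _ in range(n):
--         x = (a * x + b) % p
--     return x
-- ===== SOURCE B (Python) =====
-- def prng(n):
--     # LCG closed form: x_n = a^n*x0 + b*(a^n-1)/(a-1) (mod p), via modular exponentiation
--     x0 = 111131111
--     a = 123456789
--     b = 1
--     p = 99999199999
--     if n <= 0:
--         return x0
--     an = pow(a, n, p)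
--     inv = pow(a - 1, p - 2, p)  # p is prime, so this is the inverse of a-1 mod p
--     return (an * x0 + b * (an - 1) * inv) % p
-- ===== Notes on version B (the rewrite author's own statement) =====
-- stated objective: faster
-- what changed: Replaced the n-step LCG iteration loop with the closed form a^n*x0 + b*(a^n-1)/(a-1) mod p, computed with O(log n) modular exponentiation and the modular inverse of a-1 (p prime).
import Mathlib
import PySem

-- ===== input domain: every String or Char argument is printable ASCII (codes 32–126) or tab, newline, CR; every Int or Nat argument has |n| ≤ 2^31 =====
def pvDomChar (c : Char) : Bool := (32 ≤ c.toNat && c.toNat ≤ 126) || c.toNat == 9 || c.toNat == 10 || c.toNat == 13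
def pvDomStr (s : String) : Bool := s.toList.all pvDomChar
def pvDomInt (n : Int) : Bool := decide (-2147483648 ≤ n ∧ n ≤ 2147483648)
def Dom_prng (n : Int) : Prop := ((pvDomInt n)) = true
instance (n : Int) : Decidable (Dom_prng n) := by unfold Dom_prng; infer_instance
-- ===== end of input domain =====

-- B replaces the n-step LCG loop with the closed form a^n*x0 + b*(a^n-1)/(a-1) mod p via
-- O(log n) modular exponentiation (objective: faster).

-- ===== PORT A =====
-- for _ in range(n): x = (a*x + b) % p
def prng (n : Int) : Int :=
  let x : Int := 111131111
  let a : Int := 123456789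
  let b : Int := 1
  let p : Int := 99999199999
  (PySem.List.pyRange 0 n 1).foldl (fun x _ => PySem.Int.mod (a * x + b) p) x

-- ===== PORT B =====
-- port of Python's builtin pow(b, e, m) for m > 0, e ≥ 0: square-and-multiply, exact there.
-- fuel = e at the top call; the recursion halves e, so fuel never runs out (lemma powModAux_eq).
def powModAux : Nat → Int → Nat → Int → Int
  | 0, _, _, m => PySem.Int.mod 1 m
  | fuel+1, b, e, m =>
    if e = 0 then PySem.Int.mod 1 m
    else
      let h := powModAux fuel b (e / 2) m
      if e % 2 = 0 then PySem.Int.mod (h * h) m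
      else PySem.Int.mod (PySem.Int.mod (h * h) m * PySem.Int.mod b m) m

def powMod (b : Int) (e : Nat) (m : Int) : Int := powModAux e b e m

def prng_alt (n : Int) : Int :=
  let x0 : Int := 111131111
  let a : Int := 123456789
  let b : Int := 1
  let p : Int := 99999199999
  if n ≤ 0 then x0
  else
    let an := powMod a n.toNat p
    let inv := powMod (a - 1) (99999199999 - 2) p
    PySem.Int.mod (an * x0 + b * (an - 1) * inv) p

-- ===== PRECONDITION & SPEC =====
def Spec_prng (n : Int) (out : Int) : Prop := out = prng_alt n
instance (n : Int) (out : Int) : Decidable (Spec_prng n out) := by unfold Spec_prng; infer_instance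

-- ===== CLAIM (what is proved, stated in full; the proofs are below) =====
def Claim_equal_prng : Prop := ∀ (n : Int), Dom_prng n → Spec_prng n (prng n)

-- ===== LEMMAS AND PROOFS =====

theorem powModAux_eq (m : Int) (hm : 0 < m) : ∀ (fuel : Nat) (b : Int) (e : Nat), e ≤ fuel →
    powModAux fuel b e m = b ^ e % m := by
  intro fuel
  induction fuel with
  | zero =>
    intro b e he
    interval_cases e
    simp [powModAux, PySem.Int.mod_eq_emod_of_pos hm]
  | succ k ih =>
    intro b e he
    by_cases h0 : e = 0
    · simp [powModAux, h0, PySem.Int.mod_eq_emod_of_pos hm]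
    · have h2 : e / 2 ≤ k := by omega
      have hrec := ih b (e / 2) h2
      by_cases hpar : e % 2 = 0
      · have hsplit : e / 2 + e / 2 = e := by omega
        simp only [powModAux, h0, if_false, hpar, if_true, hrec,
          PySem.Int.mod_eq_emod_of_pos hm]
        rw [← Int.mul_emod, ← pow_add, hsplit]
      · have hsplit : e / 2 + e / 2 + 1 = e := by omega
        simp only [powModAux, h0, if_false, hpar, if_false, hrec,
          PySem.Int.mod_eq_emod_of_pos hm]
        rw [← Int.mul_emod (b ^ (e / 2)) (b ^ (e / 2)) m, ← Int.mul_emod, ← pow_add,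
          ← pow_succ, hsplit]

theorem powMod_eq (b : Int) (e : Nat) (m : Int) (hm : 0 < m) : powMod b e m = b ^ e % m :=
  powModAux_eq m hm e b e le_rfl

-- the LCG step and its iterate
def lcgStep (x : Int) : Int := (123456789 * x + 1) % 99999199999

-- geometric sum ∑_{i<m} a^i, recursively
def geom : Nat → Int
  | 0 => 0
  | m+1 => 123456789 * geom m + 1

theorem foldl_const {α : Type} (f : Int → Int) :
    ∀ (l : List α) (x : Int), l.foldl (fun x _ => f x) x = f^[l.length] x := by
  intro l
  induction l with
  | nil => intro x; rfl
  | cons a t ih => intro x; simp [List.foldl, ih, Function.iterate_succ_apply]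

theorem geom_identity : ∀ m : Nat, (123456789 - 1) * geom m = 123456789 ^ m - 1 := by
  intro m
  induction m with
  | zero => simp [geom]
  | succ k ih => rw [geom, pow_succ]; ring_nf; ring_nf at ih; linarith

theorem iter_eq : ∀ m : Nat,
    lcgStep^[m] 111131111 = (123456789 ^ m * 111131111 + geom m) % 99999199999 := by
  intro m
  induction m with
  | zero => decide
  | succ k ih =>
    rw [Function.iterate_succ_apply', ih, lcgStep]
    have h1 : ((123456789 ^ k * 111131111 + geom k) % 99999199999 : Int)
        ≡ 123456789 ^ k * 111131111 + geom k [ZMOD 99999199999] := Int.emod_emod_of_dvd _ dvd_rfl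
    have h2 : (123456789 * ((123456789 ^ k * 111131111 + geom k) % 99999199999) + 1 : Int)
        ≡ 123456789 ^ (k+1) * 111131111 + geom (k+1) [ZMOD 99999199999] := by
      calc (123456789 * ((123456789 ^ k * 111131111 + geom k) % 99999199999) + 1 : Int)
          ≡ 123456789 * (123456789 ^ k * 111131111 + geom k) + 1 [ZMOD 99999199999] :=
            ((h1.mul_left _).add_right _)
        _ = 123456789 ^ (k+1) * 111131111 + geom (k+1) := by rw [geom, pow_succ]; ring
    exact h2

set_option maxRecDepth 8000 in
theorem key_inverse :
    ((123456789 - 1) * powMod (123456789 - 1) (99999199999 - 2) 99999199999) % 99999199999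
      = 1 % 99999199999 := by
  decide

-- ===== VERDICT (by name: the statement is the Claim_ definition above) =====
theorem prng_spec : Claim_equal_prng := by
  intro n _
  unfold Spec_prng prng prng_alt
  by_cases hn : n ≤ 0
  · simp [hn]
  · have hn' : (0 : Int) < n := by omega
    simp only [hn, if_false]
    have hf : (fun (x : Int) (_ : Int) => PySem.Int.mod (123456789 * x + 1) 99999199999)
        = fun (x : Int) (_ : Int) => lcgStep x := by
      funext x y
      rw [lcgStep, PySem.Int.mod_eq_emod_of_pos (by norm_num)]
    rw [hf, foldl_const, PySem.List.length_pyRange_one]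
    have hlen : (n - 0).toNat = n.toNat := by omega
    rw [hlen, iter_eq, PySem.Int.mod_eq_emod_of_pos (by norm_num),
      powMod_eq 123456789 n.toNat 99999199999 (by norm_num)]
    set m := n.toNat with hmdef
    set I := powMod (123456789 - 1) (99999199999 - 2) 99999199999 with hI
    have h1 : ((123456789 : Int) ^ m % 99999199999) ≡ 123456789 ^ m [ZMOD 99999199999] :=
      Int.emod_emod_of_dvd _ dvd_rfl
    have hkey : ((123456789 - 1) * I : Int) ≡ 1 [ZMOD 99999199999] := key_inverse
    have h2 : ((123456789 : Int) ^ m % 99999199999 * 111131111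
          + 1 * (123456789 ^ m % 99999199999 - 1) * I)
        ≡ 123456789 ^ m * 111131111 + 1 * (123456789 ^ m - 1) * I [ZMOD 99999199999] :=
      (h1.mul_right _).add (((h1.sub_right 1).mul_left 1).mul_right I)
    have h3 : ((123456789 : Int) ^ m * 111131111 + 1 * (123456789 ^ m - 1) * I)
        ≡ 123456789 ^ m * 111131111 + geom m [ZMOD 99999199999] := by
      have hmul := hkey.mul_left (geom m)
      have he : geom m * ((123456789 - 1) * I) = 1 * ((123456789 : Int) ^ m - 1) * I := by
        rw [show geom m * (((123456789 : Int) - 1) * I)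
            = ((123456789 - 1) * geom m) * I by ring, geom_identity]
        ring
      rw [he, mul_one] at hmul
      exact (hmul.add_left _)
    exact ((h2.trans h3).symm : _ % _ = _ % _)
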